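-- pv_equiv track=rewrite | github.com/shin-ee-chen/self_correction_llms | utils/eval.py | get_last_most_common
-- ===== SOURCE A (Python) =====
-- from collections import Counter
--
-- def get_last_most_common(lst):
--     # Get counts of all elements
--     counts = Counter(lst)
--     max_count = max(counts.values())
--
--     # Get all elements with maximum count
--     most_common = [item for item, count in counts.items() if count == max_count]
--
--     # If only one most common element, return it
--     if len(most_common) == 1:
--         return most_common[0]
--
--     # If tie, find the last occurrence
--     for item in reversed(lst):
--         if item in most_common:
--             return item
-- ===== SOURCE B (Python) =====
-- from collections import Counter
--
-- def get_last_most_common(lst):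
--     counts = Counter(lst)
--     # max keeps the first element attaining the maximal count; iterating from
--     # the end makes that the last occurrence, reproducing A's tie-break.
--     return max(reversed(lst), key=counts.__getitem__)
-- ===== Notes on version B (the rewrite author's own statement) =====
-- stated objective: simpler
-- what changed: Replaces A's three-phase construction (max of counts, build the list of tied elements, branch on its length, then a membership scan over reversed(lst)) by a single keyed max over reversed(lst), which keeps the first (i.e. last-occurring) element of maximal count.
import Mathlib
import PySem

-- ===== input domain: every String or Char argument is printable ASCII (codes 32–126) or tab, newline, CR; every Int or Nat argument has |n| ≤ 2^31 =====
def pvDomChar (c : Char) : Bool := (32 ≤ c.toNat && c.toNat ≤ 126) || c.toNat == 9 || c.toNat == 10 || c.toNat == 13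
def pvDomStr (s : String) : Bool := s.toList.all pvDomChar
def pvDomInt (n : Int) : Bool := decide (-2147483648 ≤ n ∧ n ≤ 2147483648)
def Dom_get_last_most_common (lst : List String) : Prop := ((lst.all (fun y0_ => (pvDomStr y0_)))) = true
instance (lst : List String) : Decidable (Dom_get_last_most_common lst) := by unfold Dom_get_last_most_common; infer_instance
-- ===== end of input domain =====

-- B replaces A's three-phase max-count/tie-list/branch construction by one keyed max over the
-- reversed list (objective: simpler); both raise ValueError on the empty list, excluded by Pre_.


-- ===== PORT A =====
def get_last_most_common (lst : List String) : String :=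
  let counts := PySem.Dict.counter lst
  match PySem.List.max? counts.values (fun v => v) with
  | none => ""  -- max() of an empty sequence: ValueError; excluded by Pre_
  | some max_count =>
    let most_common := (counts.items.filter (fun p => p.2 == max_count)).map (fun p => p.1)
    if most_common.length == 1 then
      most_common.headD ""  -- most_common[0]; the branch guarantees length 1
    else
      match lst.reverse.find? (fun item => most_common.contains item) with
      | some item => item
      | none => ""  -- Python would fall off the loop returning None; unreachable when lst ≠ []

-- ===== PORT B =====
def get_last_most_common_alt (lst : List String) : String :=
  let counts := PySem.Dict.counter lst
  match PySem.List.max? lst.reverse (fun item => counts.getD item 0) with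
  | some item => item
  | none => ""  -- max() of an empty sequence: ValueError; excluded by Pre_

-- ===== PRECONDITION & SPEC =====
-- Pre_ excludes exactly the empty list, on which both A and B raise ValueError (max() of an empty sequence).
def Pre_get_last_most_common (lst : List String) : Prop := lst ≠ []
instance (lst : List String) : Decidable (Pre_get_last_most_common lst) := by unfold Pre_get_last_most_common; infer_instance
def pvWitness_get_last_most_common : List String := (["a", "b", "a"])

def Spec_get_last_most_common (lst : List String) (out : String) : Prop := out = get_last_most_common_alt lst
instance (lst : List String) (out : String) : Decidable (Spec_get_last_most_common lst out) := by unfold Spec_get_last_most_common; infer_instance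

-- ===== CLAIM (what is proved, stated in full; the proofs are below) =====
def Claim_equal_get_last_most_common : Prop := ∀ (lst : List String), Dom_get_last_most_common lst → Pre_get_last_most_common lst → Spec_get_last_most_common lst (get_last_most_common lst)

-- ===== LEMMAS AND PROOFS =====

-- find? only looks at the predicate's values on members
theorem find?_ext {α : Type} (xs : List α) (p q : α → Bool) (h : ∀ x ∈ xs, p x = q x) :
    xs.find? p = xs.find? q := by
  induction xs with
  | nil => rfl
  | cons x t ih =>
    simp only [List.find?]
    rw [h x (by simp)]
    cases q x with
    | true => rfl
    | false => exact ih (fun y hy => h y (by simp [hy]))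

-- the running-max loop never moves off an element whose key bounds the rest
theorem foldl_max_stay {α κ : Type} [LinearOrder κ] (key : α → κ) (t : List α) (m : α)
    (h : ∀ y ∈ t, key y ≤ key m) :
    t.foldl (fun acc x =>
      match acc with
      | none => some x
      | some m => if key m < key x then some x else some m) (some m) = some m := by
  induction t with
  | nil => rfl
  | cons y t ih =>
    simp only [List.foldl]
    rw [if_neg (not_lt.2 (h y (by simp)))]
    exact ih (fun z hz => h z (by simp [hz]))

-- with an accumulator strictly below the (attained) bound M, the running max
-- lands on the first element of key M
theorem foldl_max_find {α κ : Type} [LinearOrder κ] (key : α → κ) (M : κ) (t : List α) (m : α)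
    (hm : key m < M) (hub : ∀ y ∈ t, key y ≤ M) (hex : ∃ y ∈ t, key y = M) :
    t.foldl (fun acc x =>
      match acc with
      | none => some x
      | some m => if key m < key x then some x else some m) (some m)
      = t.find? (fun x => key x == M) := by
  induction t generalizing m with
  | nil => simp at hex
  | cons y t ih =>
    by_cases hy : key y = M
    · simp only [List.foldl, List.find?, hy, beq_self_eq_true]
      rw [if_pos (hy ▸ hm)]
      exact foldl_max_stay key t y (fun z hz => hy ▸ hub z (by simp [hz]))
    · have hy' : key y < M := lt_of_le_of_ne (hub y (by simp)) hy
      rw [List.find?_cons_of_neg (p := fun x => key x == M) (by simp [hy])]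
      simp only [List.foldl]
      obtain ⟨z, hz, hzM⟩ := hex
      have hz' : z ∈ t := by
        rcases List.mem_cons.1 hz with h | h
        · exact absurd (h ▸ hzM) hy
        · exact h
      split
      · exact ih y hy' (fun w hw => hub w (by simp [hw])) ⟨z, hz', hzM⟩
      · exact ih m hm (fun w hw => hub w (by simp [hw])) ⟨z, hz', hzM⟩

-- Python max(xs, key) is the first element attaining the (attained) upper bound M
theorem max?_eq_find? {α κ : Type} [LinearOrder κ] (xs : List α) (key : α → κ) (M : κ)
    (hub : ∀ y ∈ xs, key y ≤ M) (hex : ∃ y ∈ xs, key y = M) :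
    PySem.List.max? xs key = xs.find? (fun x => key x == M) := by
  cases xs with
  | nil => simp at hex
  | cons x t =>
    by_cases hx : key x = M
    · simp only [PySem.List.max?, List.foldl, List.find?, hx, beq_self_eq_true]
      exact foldl_max_stay key t x (fun z hz => hx ▸ hub z (by simp [hz]))
    · have hx' : key x < M := lt_of_le_of_ne (hub x (by simp)) hx
      obtain ⟨z, hz, hzM⟩ := hex
      have hz' : z ∈ t := by
        rcases List.mem_cons.1 hz with h | h
        · exact absurd (h ▸ hzM) hx
        · exact h
      rw [List.find?_cons_of_neg (p := fun x => key x == M) (by simp [hx])]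
      simp only [PySem.List.max?, List.foldl]
      exact foldl_max_find key M t x hx' (fun w hw => hub w (by simp [hw])) ⟨z, hz', hzM⟩

-- ===== VERDICT (by name: the statement is the Claim_ definition above) =====
theorem get_last_most_common_spec : Claim_equal_get_last_most_common := by
  intro lst _hdom hpre
  unfold Spec_get_last_most_common get_last_most_common get_last_most_common_alt
  simp only
  have hvals : (PySem.Dict.counter lst).values
      = (PySem.Set.ofList lst).map (fun k => ((lst.count k : Int))) := by
    simp [PySem.Dict.values, PySem.Dict.items_counter, List.map_map, Function.comp]
  have hne : (PySem.Dict.counter lst).values ≠ [] := by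
    rw [hvals]
    obtain ⟨a, t, rfl⟩ := List.exists_cons_of_ne_nil hpre
    have : a ∈ PySem.Set.ofList (a :: t) := (PySem.Set.mem_ofList _ _).2 (by simp)
    intro h
    rw [List.map_eq_nil_iff] at h
    rw [h] at this
    exact List.not_mem_nil this
  cases hmax : PySem.List.max? (PySem.Dict.counter lst).values (fun v => v) with
  | none => exact absurd ((PySem.List.max?_eq_none_iff _ _).1 hmax) hne
  | some M =>
  dsimp only
  have hub : ∀ y ∈ lst, (lst.count y : Int) ≤ M := by
    intro y hy
    exact PySem.List.max?_isMax hmax _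
      (by rw [hvals]; exact List.mem_map.2 ⟨y, (PySem.Set.mem_ofList _ _).2 hy, rfl⟩)
  have hex : ∃ y ∈ lst, (lst.count y : Int) = M := by
    have := PySem.List.max?_mem hmax
    rw [hvals] at this
    obtain ⟨k, hk, hkM⟩ := List.mem_map.1 this
    exact ⟨k, (PySem.Set.mem_ofList _ _).1 hk, hkM⟩
  have hkey : (fun item => (PySem.Dict.counter lst).getD item 0)
      = (fun item : String => (lst.count item : Int)) :=
    funext fun item => PySem.Dict.getD_counter lst item
  rw [hkey, max?_eq_find? lst.reverse _ M
    (fun y hy => hub y (List.mem_reverse.1 hy))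
    (hex.imp (fun y h => ⟨List.mem_reverse.2 h.1, h.2⟩))]
  -- the tie-list membership test is the count-equals-M test, on every member of lst
  have hmc : ((PySem.Dict.counter lst).items.filter (fun p => p.2 == M)).map (fun p => p.1)
      = (PySem.Set.ofList lst).filter (fun k => (lst.count k : Int) == M) := by
    simp [PySem.Dict.items_counter, List.filter_map, List.map_map, Function.comp_def]
  rw [hmc]
  have hfind : lst.reverse.find?
        (fun item => ((PySem.Set.ofList lst).filter (fun k => (lst.count k : Int) == M)).contains item)
      = lst.reverse.find? (fun x => (lst.count x : Int) == M) := by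
    apply find?_ext
    intro x hx
    have hx' : x ∈ lst := List.mem_reverse.1 hx
    by_cases h : (lst.count x : Int) = M <;>
      simp [List.mem_filter, PySem.Set.mem_ofList, hx', h]
  -- the find? succeeds: some element of lst has count M
  obtain ⟨m, hm⟩ : ∃ m, lst.reverse.find? (fun x => (lst.count x : Int) == M) = some m := by
    obtain ⟨y, hy, hyM⟩ := hex
    have : (lst.reverse.find? (fun x => (lst.count x : Int) == M)).isSome :=
      List.find?_isSome.2 ⟨y, List.mem_reverse.2 hy, by simp [hyM]⟩
    exact Option.isSome_iff_exists.1 this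
  split
  · -- len(most_common) == 1: the unique tied element is also what the reversed scan finds
    next hlen =>
    obtain ⟨u, hu⟩ := List.length_eq_one_iff.1 (by simpa using hlen)
    have hmem : m ∈ (PySem.Set.ofList lst).filter (fun k => (lst.count k : Int) == M) := by
      have h1 := List.find?_some hm
      have h2 := List.mem_reverse.1 (List.mem_of_find?_eq_some hm)
      simp only [beq_iff_eq] at h1
      simp [List.mem_filter, PySem.Set.mem_ofList, h2, h1]
    rw [hm, hu] at *
    simp_all
  · rw [hfind, hm]
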